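-- pv_equiv track=rewrite | github.com/randerzander/NeMo-Retriever | nemo_retriever/src/nemo_retriever/tabular_data/retrieval/generate_sql.py | _read_sql_string_literal
-- ===== SOURCE A (Python) =====
-- def _read_sql_string_literal(text: str, start: int) -> tuple[str, int] | None:
--     """Read a single-quoted SQL string from text starting at start (after the opening quote).
--     '' is treated as escaped quote. Returns (unescaped_content, index_after_closing_quote) or None."""
--     if start >= len(text) or text[start] != "'":
--         return None
--     i = start + 1
--     parts = []
--     while i < len(text):
--         if text[i] == "'":
--             if i + 1 < len(text) and text[i + 1] == "'":
--                 parts.append("'")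
--                 i += 2
--                 continue
--             return ("".join(parts), i + 1)
--         parts.append(text[i])
--         i += 1
--     return None
-- ===== SOURCE B (Python) =====
-- def _read_sql_string_literal(text: str, start: int) -> tuple[str, int] | None:
--     """Read a single-quoted SQL string from text starting at start (after the opening quote).
--     '' is treated as escaped quote. Returns (unescaped_content, index_after_closing_quote) or None."""
--     if not (0 <= start < len(text)) or text[start] != "'":
--         return None
--     parts = []
--     i = start + 1
--     while True:
--         q = text.find("'", i)
--         if q == -1:
--             return None
--         parts.append(text[i:q])
--         if q + 1 < len(text) and text[q + 1] == "'":
--             parts.append("'")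
--             i = q + 2
--         else:
--             return ("".join(parts), q + 1)
-- ===== Notes on version B (the rewrite author's own statement) =====
-- stated objective: simpler
-- what changed: B replaces A's per-character scan/append state machine with repeated str.find for the next quote plus bulk slice appends ('' detected at each found quote).
-- outside the precondition, e.g. on _read_sql_string_literal("'a'", -3): A returns ("a'a", 3), B returns None; on _read_sql_string_literal("a'b'", -3): A returns ('b', 0), B returns None; on _read_sql_string_literal('', -1): A raises IndexError, B returns None
import Mathlib
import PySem

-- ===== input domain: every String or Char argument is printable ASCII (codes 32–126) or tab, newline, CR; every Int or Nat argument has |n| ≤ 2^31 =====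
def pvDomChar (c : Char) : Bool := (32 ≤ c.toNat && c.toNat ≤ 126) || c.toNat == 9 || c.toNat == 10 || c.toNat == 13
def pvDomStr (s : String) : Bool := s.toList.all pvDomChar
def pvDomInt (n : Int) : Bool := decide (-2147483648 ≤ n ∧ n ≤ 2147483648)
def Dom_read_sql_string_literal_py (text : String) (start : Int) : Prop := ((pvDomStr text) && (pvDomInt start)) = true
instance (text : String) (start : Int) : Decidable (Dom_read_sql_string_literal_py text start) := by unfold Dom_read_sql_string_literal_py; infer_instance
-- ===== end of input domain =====

-- B replaces A's per-character scan/append with str.find for the next quote plus bulk slices (objective: simpler decomposition; return value only).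

-- ===== PORT A =====
-- the while-loop of A: Int index i scanned one character at a time, parts the accumulated characters
def pvAloop (cs : List Char) (i : Int) (parts : List Char) : Option (String × Int) :=
  if _h : i < (cs.length : Int) then
    match PySem.List.pyGet? cs i with
    | none => none  -- text[i] raises IndexError (only reachable for i < -len, outside Pre_)
    | some c =>
      if c = '\'' then
        if i + 1 < (cs.length : Int) ∧ PySem.List.pyGet? cs (i + 1) = some '\'' then
          pvAloop cs (i + 2) (parts ++ ['\''])
        else some (String.ofList parts, i + 1)
      else pvAloop cs (i + 1) (parts ++ [c])
  else none
termination_by (cs.length - i).toNat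
decreasing_by all_goals omega

def read_sql_string_literal_py (text : String) (start : Int) : Option (String × Int) :=
  if start ≥ (PySem.Str.len text : Int) then none
  else
    match PySem.Str.pyGet? text start with
    | none => none  -- text[start] raises IndexError (start < -len(text), outside Pre_)
    | some c =>
      if c ≠ '\'' then none
      else pvAloop text.toList (start + 1) []

-- ===== PORT B =====
-- needed by pvBloop's termination proof and the equivalence: facts about str.find
theorem pvGo_ge (sub : List Char) (l : List Char) : ∀ (k : Nat), PySem.Chars.find.go sub l k = -1 ∨ (k : Int) ≤ PySem.Chars.find.go sub l k := by
  induction l with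
  | nil => intro k; by_cases hs : sub.isEmpty <;> simp [PySem.Chars.find.go, hs]
  | cons a t ih =>
    intro k
    by_cases hp : sub.isPrefixOf (a :: t)
    · simp [PySem.Chars.find.go, hp]
    · rcases ih (k + 1) with h1 | h1 <;> simp [PySem.Chars.find.go, hp] <;> [left; right] <;> first | exact h1 | (push_cast at h1 ⊢; omega)

theorem pvFindFrom_ge (cs sub : List Char) (i : Nat)
    (h : PySem.Chars.findFrom cs sub (i : Int) ≠ -1) :
    (i : Int) ≤ PySem.Chars.findFrom cs sub (i : Int) := by
  have h0 : ¬ ((i : Int) < 0) := by omega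
  unfold PySem.Chars.findFrom at h ⊢
  simp only [PySem.Chars.find, h0, if_false] at h ⊢
  by_cases hc : ((cs.length : Nat) : Int) < (i : Int)
  · simp [hc] at h
  · simp only [if_neg hc] at h ⊢
    rcases pvGo_ge sub (List.drop ((i : Int)).toNat (List.take (((cs.length : Nat) : Int)).toNat cs)) 0 with h1 | h1
    · rw [if_pos h1] at h; exact absurd rfl h
    · split at h
      · exact absurd rfl h
      · rename_i hgo1
        simp only [if_neg hgo1]
        omega

-- the while-loop of B: jump to the next quote with find, slice the chunk before it
def pvBloop (cs : List Char) (i : Nat) (parts : List (List Char)) : Option (String × Int) :=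
  let q := PySem.Chars.findFrom cs ['\''] (i : Int)
  if hq : q = -1 then none
  else
    let parts' := parts ++ [PySem.Chars.slice cs (some (i : Int)) (some q)]
    if q + 1 < (cs.length : Int) ∧ PySem.List.pyGet? cs (q + 1) = some '\'' then
      pvBloop cs (q.toNat + 2) (parts' ++ [['\'']])
    else some (String.ofList (PySem.Chars.join [] parts'), q + 1)
termination_by cs.length + 2 - i
decreasing_by
  have := pvFindFrom_ge cs ['\''] i hq
  omega

def read_sql_string_literal_py_alt (text : String) (start : Int) : Option (String × Int) :=
  if ¬ (0 ≤ start ∧ start < (PySem.Str.len text : Int)) then none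
  else if PySem.Str.pyGet? text start ≠ some '\'' then none
  else pvBloop text.toList (start.toNat + 1) []

-- ===== PRECONDITION & SPEC =====
-- Pre_ admits every start ≥ 0 and also the negative starts whose wrapped character text[start] is not a
-- quote (there A returns None and B agrees). It excludes start < -len(text), where A raises IndexError,
-- and -len(text) ≤ start < 0 with text[start] = "'", where A's negative-index wraparound accidentally
-- parses a literal from a wrapped position (it can even return an index before start); B returns None
-- for any negative start.
def Pre_read_sql_string_literal_py (text : String) (start : Int) : Prop :=
  0 ≤ start ∨ (0 ≤ start + (PySem.Str.len text : Int) ∧ PySem.Str.pyGet? text start ≠ some '\'')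
instance (text : String) (start : Int) : Decidable (Pre_read_sql_string_literal_py text start) := by unfold Pre_read_sql_string_literal_py; infer_instance

def pvWitness_read_sql_string_literal_py : String × Int := ("'ab''c'x", 0)

def Spec_read_sql_string_literal_py (text : String) (start : Int) (out : Option (String × Int)) : Prop := out = read_sql_string_literal_py_alt text start
instance (text : String) (start : Int) (out : Option (String × Int)) : Decidable (Spec_read_sql_string_literal_py text start out) := by unfold Spec_read_sql_string_literal_py; infer_instance

-- ===== CLAIM (what is proved, stated in full; the proofs are below) =====
def Claim_equal_read_sql_string_literal_py : Prop := ∀ (text : String) (start : Int), Dom_read_sql_string_literal_py text start → Pre_read_sql_string_literal_py text start → Spec_read_sql_string_literal_py text start (read_sql_string_literal_py text start)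
-- ===== LEMMAS AND PROOFS =====

theorem pvFind_nonneg (l sub : List Char) : PySem.Chars.find l sub = -1 ∨ 0 ≤ PySem.Chars.find l sub := by
  have := pvGo_ge sub l 0
  simpa [PySem.Chars.find] using this

theorem join_nil_flatten (xs : List (List Char)) : PySem.Chars.join [] xs = xs.flatten := by
  induction xs with
  | nil => rfl
  | cons h t ih =>
    cases t with
    | nil => simp [PySem.Chars.join, List.intercalate, List.intersperse]
    | cons a b =>
      simp only [PySem.Chars.join, List.intercalate, List.intersperse] at *
      simp_all

theorem pvJoin_append (xs : List (List Char)) (y : List Char) :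
    PySem.Chars.join [] (xs ++ [y]) = PySem.Chars.join [] xs ++ y := by
  simp [join_nil_flatten]

theorem prefix_singleton_iff (c : Char) (l : List Char) : [c] <+: l ↔ l.head? = some c := by
  cases l <;> simp [List.cons_prefix_iff]

-- A's loop walks a quote-free block one character at a time
theorem pvAloop_skip (cs : List Char) (k : Nat) : ∀ (i : Nat) (parts : List Char),
    i + k ≤ cs.length →
    (∀ j, i ≤ j → j < i + k → cs[j]? ≠ some '\'') →
    pvAloop cs (i : Int) parts = pvAloop cs ((i + k : Nat) : Int) (parts ++ (cs.drop i).take k) := by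
  induction k with
  | zero => intro i parts _ _; simp
  | succ k ih =>
    intro i parts hlen hq
    have hi : i < cs.length := by omega
    have hget : PySem.List.pyGet? cs (i : Int) = some cs[i] := by
      rw [PySem.List.pyGet?_natCast, List.getElem?_eq_getElem hi]
    have hne : ¬ (cs[i] = '\'') := by
      intro hc; exact hq i le_rfl (by omega) (by rw [List.getElem?_eq_getElem hi, hc])
    rw [pvAloop]
    rw [dif_pos (by exact_mod_cast hi)]
    simp only [hget, if_neg hne]
    have hcast : ((i : Int) + 1) = ((i + 1 : Nat) : Int) := by push_cast; ring
    rw [hcast, ih (i + 1) (parts ++ [cs[i]]) (by omega)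
        (by intro j hj1 hj2; exact hq j (by omega) (by omega))]
    have hcast2 : ((i + 1 + k : Nat) : Int) = ((i + (k + 1) : Nat) : Int) := by push_cast; ring
    rw [hcast2, List.append_assoc]
    congr 2
    rw [List.drop_eq_getElem_cons hi, List.take_succ_cons]
    simp

-- no quote at or after i: A's loop returns none
theorem pvAloop_none (cs : List Char) (i : Nat) (parts : List Char)
    (h : ∀ j, i ≤ j → cs[j]? ≠ some '\'') :
    pvAloop cs (i : Int) parts = none := by
  by_cases hi : i ≤ cs.length
  · rw [pvAloop_skip cs (cs.length - i) i parts (by omega)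
        (by intro j hj1 hj2; exact h j hj1)]
    rw [pvAloop]
    rw [dif_neg (by omega)]
  · rw [pvAloop]
    rw [dif_neg (by omega)]

theorem pvGetElem?_of_infix_none (cs : List Char) (i : Nat)
    (hmem : ¬ ('\'' ∈ cs.drop i)) : ∀ j, i ≤ j → cs[j]? ≠ some '\'' := by
  intro j hj hc
  apply hmem
  have : (cs.drop i)[j - i]? = some '\'' := by
    rw [List.getElem?_drop]
    rwa [Nat.add_sub_cancel' hj]
  exact List.mem_of_getElem? this

theorem loop_eq (cs : List Char) : ∀ (n : Nat), ∀ (i : Nat), cs.length - i ≤ n → i ≤ cs.length →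
    ∀ (pb : List (List Char)),
    pvAloop cs (i : Int) (PySem.Chars.join [] pb) = pvBloop cs i pb := by
  intro n
  induction n with
  | zero =>
    intro i hfuel hi pb
    have hieq : i = cs.length := by omega
    rw [pvBloop]
    have hq : PySem.Chars.findFrom cs ['\''] (i : Int) = -1 := by
      rw [PySem.Chars.findFrom_natCast cs ['\''] i hi, hieq]
      simp [PySem.Chars.find, PySem.Chars.find.go]
    rw [dif_pos hq, pvAloop, dif_neg (by omega)]
  | succ n ih =>
    intro i hfuel hi pb
    rw [pvBloop]
    rw [PySem.Chars.findFrom_natCast cs ['\''] i hi]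
    by_cases hfind : PySem.Chars.find (List.drop i cs) ['\''] = -1
    · rw [dif_pos (by rw [if_pos hfind])]
      have hmem : ¬ ('\'' ∈ cs.drop i) := by
        have h2 := (PySem.Chars.find_eq_neg_one_iff (List.drop i cs) ['\'']).mp hfind
        intro hm; exact h2 ((List.singleton_infix_iff _ _).mpr hm)
      exact pvAloop_none cs i _ (pvGetElem?_of_infix_none cs i hmem)
    · have hf0 : 0 ≤ PySem.Chars.find (List.drop i cs) ['\''] := by
        rcases pvFind_nonneg (List.drop i cs) ['\''] with h1 | h1
        · exact absurd h1 hfind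
        · exact h1
      have hqne : ¬ ((if PySem.Chars.find (List.drop i cs) ['\''] = -1 then (-1 : Int)
          else (i : Int) + PySem.Chars.find (List.drop i cs) ['\'']) = -1) := by
        rw [if_neg hfind]; omega
      rw [dif_neg hqne, if_neg hfind]
      have hffne : PySem.Chars.findFrom cs ['\''] (i : Int) ≠ -1 := by
        rw [PySem.Chars.findFrom_natCast cs ['\''] i hi, if_neg hfind]; omega
      obtain ⟨hge, hpre, hmin⟩ := PySem.Chars.findFrom_natCast_spec cs ['\''] i hi hffne
      rw [PySem.Chars.findFrom_natCast cs ['\''] i hi, if_neg hfind] at hpre hmin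
      have htn : (((i : Int) + PySem.Chars.find (List.drop i cs) ['\'']).toNat) = i + (PySem.Chars.find (List.drop i cs) ['\'']).toNat := by omega
      rw [htn] at hpre hmin
      obtain ⟨fn, hfn⟩ : ∃ fn, (PySem.Chars.find (List.drop i cs) ['\'']).toNat = fn := ⟨_, rfl⟩
      rw [hfn] at hpre hmin
      have hc1 : (i : Int) + PySem.Chars.find (List.drop i cs) ['\''] = ((i + fn : Nat) : Int) := by push_cast; omega
      simp only [hc1]
      have hq' : cs[i + fn]? = some '\'' := by
        rw [← List.head?_drop]; exact (prefix_singleton_iff _ _).mp hpre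
      have hqlt : i + fn < cs.length := by
        have h2 := hq'; rw [List.getElem?_eq_some_iff] at h2; exact h2.1
      have hminj : ∀ j, i ≤ j → j < i + fn → cs[j]? ≠ some '\'' := by
        intro j hj1 hj2 hc
        exact hmin j hj1 hj2 ((prefix_singleton_iff _ _).mpr (by rwa [List.head?_drop]))
      rw [pvAloop_skip cs fn i _ (by omega) (by intro j hj1 hj2; exact hminj j hj1 (by omega))]
      rw [pvAloop, dif_pos (by exact_mod_cast hqlt)]
      have hget2 : PySem.List.pyGet? cs ((i + fn : Nat) : Int) = some '\'' := by
        rw [PySem.List.pyGet?_natCast]; exact hq'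
      simp only [hget2]
      rw [if_pos trivial]
      simp only [PySem.Chars.slice]
      rw [PySem.List.slice_natCast, Nat.add_sub_cancel_left]
      by_cases hesc : ((i + fn : Nat) : Int) + 1 < ((cs.length : Nat) : Int) ∧ PySem.List.pyGet? cs (((i + fn : Nat) : Int) + 1) = some '\''
      · rw [if_pos hesc, if_pos hesc]
        have hlt2 : i + fn + 2 ≤ cs.length := by
          have h3 := hesc.1; omega
        have hcast3 : ((i + fn : Nat) : Int) + 2 = ((i + fn + 2 : Nat) : Int) := by push_cast; ring
        rw [hcast3, Int.toNat_natCast]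
        rw [← ih (i + fn + 2) (by omega) (by omega) (pb ++ [List.take fn (List.drop i cs)] ++ [['\'']])]
        rw [List.append_assoc, pvJoin_append, pvJoin_append, List.append_assoc]
      · rw [if_neg hesc, if_neg hesc]
        rw [pvJoin_append]

-- ===== VERDICT (by name: the statement is the Claim_ definition above) =====
theorem read_sql_string_literal_py_spec : Claim_equal_read_sql_string_literal_py := by
  intro text start _dom hpre
  unfold Pre_read_sql_string_literal_py at hpre
  unfold Spec_read_sql_string_literal_py read_sql_string_literal_py read_sql_string_literal_py_alt
  rw [PySem.Str.len_eq] at hpre ⊢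
  by_cases hneg : 0 ≤ start
  · by_cases hlt : start < (text.toList.length : Int)
    · rw [if_neg (by omega), if_neg (not_not_intro ⟨hneg, hlt⟩)]
      have hsn : start = ((start.toNat : Nat) : Int) := by omega
      have hslt : start.toNat < text.toList.length := by omega
      have hget : PySem.Str.pyGet? text start = some text.toList[start.toNat] := by
        conv_lhs => rw [hsn]
        rw [show PySem.Str.pyGet? text ((start.toNat : Nat) : Int) = PySem.List.pyGet? text.toList ((start.toNat : Nat) : Int) from rfl]
        rw [PySem.List.pyGet?_natCast, List.getElem?_eq_getElem hslt]
      simp only [hget]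
      by_cases hc : text.toList[start.toNat] = '\''
      · simp only [hc]
        rw [if_neg (by simp)]
        have hcast : start + 1 = ((start.toNat + 1 : Nat) : Int) := by omega
        rw [hcast]
        have := loop_eq text.toList text.toList.length (start.toNat + 1) (by omega) (by omega) []
        simpa [PySem.Chars.join_nil] using this
      · rw [if_pos (by simp [hc]), if_pos (by simp [hc])]
    · rw [if_pos (by omega), if_pos (fun hcon => hlt hcon.2)]
  · obtain ⟨hlen, hnq⟩ := hpre.resolve_left hneg
    rw [if_neg (by omega), if_pos (fun hcon => hneg hcon.1)]
    rcases h : PySem.Str.pyGet? text start with _ | c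
    · rfl
    · show (if c ≠ '\'' then none else pvAloop text.toList (start + 1) []) = none
      rw [if_pos (fun hc => hnq (by rw [h, hc]))]
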